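-- pv_equiv track=rewrite | github.com/nestorNeo/WFNAPP | src/core/petrinet.py | detect_bridges_around_concurrent
-- ===== SOURCE A (Python) =====
-- def detect_bridges_around_concurrent(simplified_relation, concurrent_events):
--     """
--     Versión mejorada que detecta bridges alrededor de eventos concurrentes
--     """
--     bridges = set()
--
--     # Mapear eventos anteriores y posteriores a concurrencias
--     pre_concurrent = {}  # {concurrent_event: set(previous_events)}
--     post_concurrent = {} # {concurrent_event: set(next_events)}
--
--     for a, b in simplified_relation:
--         if '||' in str(b):
--             if b not in pre_concurrent:
--                 pre_concurrent[b] = set()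
--             pre_concurrent[b].add(a)
--
--         if '||' in str(a):
--             if a not in post_concurrent:
--                 post_concurrent[a] = set()
--             post_concurrent[a].add(b)
--
--     # Analizar cada evento concurrente
--     for conc_event in set(pre_concurrent.keys()) | set(post_concurrent.keys()):
--         # Obtener eventos anteriores y posteriores
--         prev_events = pre_concurrent.get(conc_event, set())
--         next_events = post_concurrent.get(conc_event, set())
--
--         # Crear bridges entre eventos anteriores y posteriores
--         for prev in prev_events:
--             for next in next_events:
--                 if prev != 'start' and next != 'end':
--                     bridges.add((prev, next))
--
--     return bridges
-- ===== SOURCE B (Python) =====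
-- def detect_bridges_around_concurrent(simplified_relation, concurrent_events):
--     """Re-implementation: no pre/post index dicts; for each distinct concurrent
--     middle event, re-scan the relation for its sources and targets directly."""
--     bridges = set()
--     mids = [b for a, b in simplified_relation if '||' in str(b)] + \
--            [a for a, b in simplified_relation if '||' in str(a)]
--     for m in dict.fromkeys(mids):
--         for prev in dict.fromkeys(a for a, b in simplified_relation if b == m):
--             for nxt in dict.fromkeys(b for a, b in simplified_relation if a == m):
--                 if prev != 'start' and nxt != 'end':
--                     bridges.add((prev, nxt))
--     return bridges
-- ===== Notes on version B (the rewrite author's own statement) =====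
-- stated objective: simpler
-- what changed: B drops A's pre/post index dicts entirely: it builds the list of distinct concurrent middle events and, for each, re-scans the relation with comprehensions for its sources and targets, forming the bridge product directly.
import Mathlib
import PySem

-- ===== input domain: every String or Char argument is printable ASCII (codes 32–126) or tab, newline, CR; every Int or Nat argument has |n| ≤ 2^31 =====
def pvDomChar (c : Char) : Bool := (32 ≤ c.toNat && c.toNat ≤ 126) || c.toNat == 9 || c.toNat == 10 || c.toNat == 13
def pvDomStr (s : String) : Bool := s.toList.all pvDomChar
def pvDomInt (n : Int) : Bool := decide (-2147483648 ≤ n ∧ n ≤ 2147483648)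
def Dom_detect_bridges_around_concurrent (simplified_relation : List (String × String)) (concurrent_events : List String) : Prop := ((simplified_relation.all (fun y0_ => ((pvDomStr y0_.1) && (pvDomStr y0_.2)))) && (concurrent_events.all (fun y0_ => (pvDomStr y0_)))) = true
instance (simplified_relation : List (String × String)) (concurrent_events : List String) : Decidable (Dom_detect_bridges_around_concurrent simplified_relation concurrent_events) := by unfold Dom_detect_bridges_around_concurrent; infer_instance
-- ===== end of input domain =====

-- B drops A's pre/post index dicts and instead, for each distinct concurrent middle
-- event, re-scans the relation for its sources and targets directly (simpler; not faster).
-- Both programs return a Python set; its hash iteration order is not modelled — the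
-- ports determinize it as first-insertion order, identically on both sides.

-- ===== PORT A =====
-- the body of A's first loop (builds the pre/post dicts of sets)
def pvStepA (st : PySem.Dict String (PySem.Set String) × PySem.Dict String (PySem.Set String))
    (p : String × String) :
    PySem.Dict String (PySem.Set String) × PySem.Dict String (PySem.Set String) :=
  let a := p.1
  let b := p.2
  let pre := if PySem.Str.isIn "||" b then
      (if st.1.contains b then st.1 else st.1.insert b PySem.Set.empty).modify b PySem.Set.empty
        (fun s => PySem.Set.add s a)
    else st.1
  let post := if PySem.Str.isIn "||" a then
      (if st.2.contains a then st.2 else st.2.insert a PySem.Set.empty).modify a PySem.Set.empty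
        (fun s => PySem.Set.add s b)
    else st.2
  (pre, post)

def detect_bridges_around_concurrent (simplified_relation : List (String × String)) (concurrent_events : List String) : List (String × String) :=
  let st := simplified_relation.foldl pvStepA (PySem.Dict.empty, PySem.Dict.empty)
  let pre_concurrent := st.1
  let post_concurrent := st.2
  (PySem.Set.union (PySem.Set.ofList pre_concurrent.keys) (PySem.Set.ofList post_concurrent.keys)).foldl
    (fun bridges conc_event =>
      let prev_events := pre_concurrent.getD conc_event PySem.Set.empty
      let next_events := post_concurrent.getD conc_event PySem.Set.empty
      prev_events.foldl (fun bridges prev =>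
        next_events.foldl (fun bridges nxt =>
          if prev ≠ "start" ∧ nxt ≠ "end" then PySem.Set.add bridges (prev, nxt) else bridges)
          bridges) bridges)
    PySem.Set.empty

-- ===== PORT B =====
def detect_bridges_around_concurrent_alt (simplified_relation : List (String × String)) (concurrent_events : List String) : List (String × String) :=
  let mids := ((simplified_relation.filter (fun p => PySem.Str.isIn "||" p.2)).map (·.2)) ++
              ((simplified_relation.filter (fun p => PySem.Str.isIn "||" p.1)).map (·.1))
  (PySem.List.dedup mids).foldl (fun bridges m =>
    (PySem.List.dedup ((simplified_relation.filter (fun p => p.2 == m)).map (·.1))).foldl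
      (fun bridges prev =>
        (PySem.List.dedup ((simplified_relation.filter (fun p => p.1 == m)).map (·.2))).foldl
          (fun bridges nxt =>
            if prev ≠ "start" ∧ nxt ≠ "end" then PySem.Set.add bridges (prev, nxt) else bridges)
          bridges) bridges)
    PySem.Set.empty

-- ===== PRECONDITION & SPEC =====
def Spec_detect_bridges_around_concurrent (simplified_relation : List (String × String)) (concurrent_events : List String) (out : List (String × String)) : Prop := out = detect_bridges_around_concurrent_alt simplified_relation concurrent_events
instance (simplified_relation : List (String × String)) (concurrent_events : List String) (out : List (String × String)) : Decidable (Spec_detect_bridges_around_concurrent simplified_relation concurrent_events out) := by unfold Spec_detect_bridges_around_concurrent; infer_instance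

-- ===== CLAIM (what is proved, stated in full; the proofs are below) =====
def Claim_equal_detect_bridges_around_concurrent : Prop := ∀ (simplified_relation : List (String × String)) (concurrent_events : List String), Dom_detect_bridges_around_concurrent simplified_relation concurrent_events → Spec_detect_bridges_around_concurrent simplified_relation concurrent_events (detect_bridges_around_concurrent simplified_relation concurrent_events)

-- ===== LEMMAS AND PROOFS =====

-- one step of A's dict-building on a single dict: keys gain the key, the bucket gains the element
lemma pvStep_keys (d : PySem.Dict String (PySem.Set String)) (b a : String) :
    ((if d.contains b then d else d.insert b PySem.Set.empty).modify b PySem.Set.empty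
      (fun s => PySem.Set.add s a)).keys = PySem.Set.add d.keys b := by
  rw [PySem.Dict.keys_modify]
  by_cases h : d.contains b = true
  · rw [if_pos h, PySem.Dict.keys_insert_of_contains d _ h,
      PySem.Set.add_of_mem ((PySem.Dict.contains_iff_mem_keys d b).mp h)]
  · have h' : d.contains b = false := by simpa using h
    rw [if_neg (by simp [h']),
      PySem.Dict.keys_insert_of_contains _ _ (by simp [PySem.Dict.contains_insert_self]),
      PySem.Dict.keys_insert_of_not_contains d _ h',
      PySem.Set.add_of_not_mem (fun hm => by simp [(PySem.Dict.contains_iff_mem_keys d b).mpr hm] at h')]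

lemma pvStep_getD (d : PySem.Dict String (PySem.Set String)) (b a m : String) :
    ((if d.contains b then d else d.insert b PySem.Set.empty).modify b PySem.Set.empty
      (fun s => PySem.Set.add s a)).getD m PySem.Set.empty =
    if m = b then PySem.Set.add (d.getD m PySem.Set.empty) a else d.getD m PySem.Set.empty := by
  rw [PySem.Dict.getD_modify]
  by_cases hm : m = b
  · subst hm
    rw [if_pos rfl, if_pos rfl]
    by_cases h : d.contains m = true
    · rw [if_pos h]
    · have h' : d.contains m = false := by simpa using h
      rw [if_neg (by simp [h']), PySem.Dict.getD_insert, if_pos rfl,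
        PySem.Dict.getD_of_not_contains d _ h']
  · rw [if_neg hm, if_neg hm]
    by_cases h : d.contains b = true
    · rw [if_pos h]
    · have h' : d.contains b = false := by simpa using h
      rw [if_neg (by simp [h']), PySem.Dict.getD_insert, if_neg hm]

-- invariant of A's first loop, pre side
lemma pvLoop_pre_keys (rel : List (String × String))
    (pre post : PySem.Dict String (PySem.Set String)) :
    ((rel.foldl pvStepA (pre, post)).1).keys =
      PySem.Set.update pre.keys ((rel.filter (fun p => PySem.Str.isIn "||" p.2)).map (·.2)) := by
  induction rel generalizing pre post with
  | nil => simp only [List.foldl_nil, List.filter_nil, List.map_nil, PySem.Set.update_nil]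
  | cons p rel ih =>
    obtain ⟨a, b⟩ := p
    have hsplit : pvStepA (pre, post) (a, b) =
        ((pvStepA (pre, post) (a, b)).1, (pvStepA (pre, post) (a, b)).2) := rfl
    rw [List.foldl_cons, hsplit, ih]
    by_cases hb : PySem.Str.isIn "||" b = true
    · rw [List.filter_cons_of_pos (p := fun q : String × String => PySem.Str.isIn "||" q.2)
        (a := (a, b)) (l := rel) hb, List.map_cons, PySem.Set.update_cons]
      have h1 : (pvStepA (pre, post) (a, b)).1 =
          (if pre.contains b then pre else pre.insert b PySem.Set.empty).modify b PySem.Set.empty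
            (fun s => PySem.Set.add s a) := by
        simp only [pvStepA, hb, if_true]
      rw [h1, pvStep_keys]
    · rw [List.filter_cons_of_neg (p := fun q : String × String => PySem.Str.isIn "||" q.2)
        (a := (a, b)) (l := rel) hb]
      have hb' : PySem.Str.isIn "||" b = false := by simpa using hb
      have h1 : (pvStepA (pre, post) (a, b)).1 = pre := by
        simp only [pvStepA, hb', if_false, Bool.false_eq_true]
      rw [h1]

lemma pvLoop_pre_getD (rel : List (String × String))
    (pre post : PySem.Dict String (PySem.Set String)) (m : String) :
    ((rel.foldl pvStepA (pre, post)).1).getD m PySem.Set.empty =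
      PySem.Set.update (pre.getD m PySem.Set.empty)
        ((rel.filter (fun p => PySem.Str.isIn "||" p.2 && p.2 == m)).map (·.1)) := by
  induction rel generalizing pre post with
  | nil => simp only [List.foldl_nil, List.filter_nil, List.map_nil, PySem.Set.update_nil]
  | cons p rel ih =>
    obtain ⟨a, b⟩ := p
    have hsplit : pvStepA (pre, post) (a, b) =
        ((pvStepA (pre, post) (a, b)).1, (pvStepA (pre, post) (a, b)).2) := rfl
    rw [List.foldl_cons, hsplit, ih]
    by_cases hb : PySem.Str.isIn "||" b = true
    · have h1 : (pvStepA (pre, post) (a, b)).1 =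
          (if pre.contains b then pre else pre.insert b PySem.Set.empty).modify b PySem.Set.empty
            (fun s => PySem.Set.add s a) := by
        simp only [pvStepA, hb, if_true]
      by_cases hm : b = m
      · rw [List.filter_cons_of_pos (p := fun q : String × String =>
            PySem.Str.isIn "||" q.2 && q.2 == m) (a := (a, b)) (l := rel)
            (by show (PySem.Str.isIn "||" b && (b == m)) = true; rw [hb, hm]; simp),
          List.map_cons, PySem.Set.update_cons, h1, pvStep_getD, if_pos hm.symm]
      · rw [List.filter_cons_of_neg (p := fun q : String × String =>
            PySem.Str.isIn "||" q.2 && q.2 == m) (a := (a, b)) (l := rel)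
            (by intro hc; simp only [Bool.and_eq_true, beq_iff_eq] at hc; exact hm hc.2),
          h1, pvStep_getD, if_neg (fun h => hm h.symm)]
    · have hb' : PySem.Str.isIn "||" b = false := by simpa using hb
      rw [List.filter_cons_of_neg (p := fun q : String × String =>
          PySem.Str.isIn "||" q.2 && q.2 == m) (a := (a, b)) (l := rel)
          (by intro hc; simp only [Bool.and_eq_true] at hc; exact hb hc.1)]
      have h1 : (pvStepA (pre, post) (a, b)).1 = pre := by
        simp only [pvStepA, hb', if_false, Bool.false_eq_true]
      rw [h1]

-- invariant of A's first loop, post side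
lemma pvLoop_post_keys (rel : List (String × String))
    (pre post : PySem.Dict String (PySem.Set String)) :
    ((rel.foldl pvStepA (pre, post)).2).keys =
      PySem.Set.update post.keys ((rel.filter (fun p => PySem.Str.isIn "||" p.1)).map (·.1)) := by
  induction rel generalizing pre post with
  | nil => simp only [List.foldl_nil, List.filter_nil, List.map_nil, PySem.Set.update_nil]
  | cons p rel ih =>
    obtain ⟨a, b⟩ := p
    have hsplit : pvStepA (pre, post) (a, b) =
        ((pvStepA (pre, post) (a, b)).1, (pvStepA (pre, post) (a, b)).2) := rfl
    rw [List.foldl_cons, hsplit, ih]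
    by_cases ha : PySem.Str.isIn "||" a = true
    · rw [List.filter_cons_of_pos (p := fun q : String × String => PySem.Str.isIn "||" q.1)
        (a := (a, b)) (l := rel) ha, List.map_cons, PySem.Set.update_cons]
      have h1 : (pvStepA (pre, post) (a, b)).2 =
          (if post.contains a then post else post.insert a PySem.Set.empty).modify a PySem.Set.empty
            (fun s => PySem.Set.add s b) := by
        simp only [pvStepA, ha, if_true]
      rw [h1, pvStep_keys]
    · rw [List.filter_cons_of_neg (p := fun q : String × String => PySem.Str.isIn "||" q.1)
        (a := (a, b)) (l := rel) ha]
      have ha' : PySem.Str.isIn "||" a = false := by simpa using ha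
      have h1 : (pvStepA (pre, post) (a, b)).2 = post := by
        simp only [pvStepA, ha', if_false, Bool.false_eq_true]
      rw [h1]

lemma pvLoop_post_getD (rel : List (String × String))
    (pre post : PySem.Dict String (PySem.Set String)) (m : String) :
    ((rel.foldl pvStepA (pre, post)).2).getD m PySem.Set.empty =
      PySem.Set.update (post.getD m PySem.Set.empty)
        ((rel.filter (fun p => PySem.Str.isIn "||" p.1 && p.1 == m)).map (·.2)) := by
  induction rel generalizing pre post with
  | nil => simp only [List.foldl_nil, List.filter_nil, List.map_nil, PySem.Set.update_nil]
  | cons p rel ih =>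
    obtain ⟨a, b⟩ := p
    have hsplit : pvStepA (pre, post) (a, b) =
        ((pvStepA (pre, post) (a, b)).1, (pvStepA (pre, post) (a, b)).2) := rfl
    rw [List.foldl_cons, hsplit, ih]
    by_cases ha : PySem.Str.isIn "||" a = true
    · have h1 : (pvStepA (pre, post) (a, b)).2 =
          (if post.contains a then post else post.insert a PySem.Set.empty).modify a PySem.Set.empty
            (fun s => PySem.Set.add s b) := by
        simp only [pvStepA, ha, if_true]
      by_cases hm : a = m
      · rw [List.filter_cons_of_pos (p := fun q : String × String =>
            PySem.Str.isIn "||" q.1 && q.1 == m) (a := (a, b)) (l := rel)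
            (by show (PySem.Str.isIn "||" a && (a == m)) = true; rw [ha, hm]; simp),
          List.map_cons, PySem.Set.update_cons, h1, pvStep_getD, if_pos hm.symm]
      · rw [List.filter_cons_of_neg (p := fun q : String × String =>
            PySem.Str.isIn "||" q.1 && q.1 == m) (a := (a, b)) (l := rel)
            (by intro hc; simp only [Bool.and_eq_true, beq_iff_eq] at hc; exact hm hc.2),
          h1, pvStep_getD, if_neg (fun h => hm h.symm)]
    · have ha' : PySem.Str.isIn "||" a = false := by simpa using ha
      rw [List.filter_cons_of_neg (p := fun q : String × String =>
          PySem.Str.isIn "||" q.1 && q.1 == m) (a := (a, b)) (l := rel)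
          (by intro hc; simp only [Bool.and_eq_true] at hc; exact ha hc.1)]
      have h1 : (pvStepA (pre, post) (a, b)).2 = post := by
        simp only [pvStepA, ha', if_false, Bool.false_eq_true]
      rw [h1]

-- updating with a deduplicated list is updating with the list itself
lemma pvUpdate_ofList (s : PySem.Set String) (xs : List String) :
    PySem.Set.update s (PySem.Set.ofList xs) = PySem.Set.update s xs := by
  rw [PySem.Set.update_eq_append_filter, PySem.Set.update_eq_append_filter s xs,
    PySem.Set.ofList_ofList]

-- ===== VERDICT (by name: the statement is the Claim_ definition above) =====
theorem detect_bridges_around_concurrent_spec : Claim_equal_detect_bridges_around_concurrent := by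
  intro rel conc _
  unfold Spec_detect_bridges_around_concurrent
  unfold detect_bridges_around_concurrent detect_bridges_around_concurrent_alt
  simp only [PySem.List.dedup_eq_ofList]
  set bs := (rel.filter (fun p => PySem.Str.isIn "||" p.2)).map (·.2) with hbs
  set as := (rel.filter (fun p => PySem.Str.isIn "||" p.1)).map (·.1) with has
  have hkpre : ((rel.foldl pvStepA (PySem.Dict.empty, PySem.Dict.empty)).1).keys = PySem.Set.ofList bs := by
    rw [pvLoop_pre_keys, PySem.Dict.keys_empty, PySem.Set.update_nil_left]
  have hkpost : ((rel.foldl pvStepA (PySem.Dict.empty, PySem.Dict.empty)).2).keys = PySem.Set.ofList as := by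
    rw [pvLoop_post_keys, PySem.Dict.keys_empty, PySem.Set.update_nil_left]
  have hu : ∀ (s : PySem.Set String) (t : List String),
      PySem.Set.union s t = PySem.Set.update s t := fun _ _ => rfl
  have hiter : PySem.Set.union (PySem.Set.ofList ((rel.foldl pvStepA (PySem.Dict.empty, PySem.Dict.empty)).1).keys)
      (PySem.Set.ofList ((rel.foldl pvStepA (PySem.Dict.empty, PySem.Dict.empty)).2).keys) =
      PySem.Set.ofList (bs ++ as) := by
    rw [hkpre, hkpost, PySem.Set.ofList_ofList bs, PySem.Set.ofList_ofList as, hu,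
      pvUpdate_ofList, PySem.Set.ofList_append]
  rw [hiter]
  apply PySem.List.foldl_congr_mem
  intro acc m hm
  have hm' : PySem.Str.isIn "||" m = true := by
    rcases List.mem_append.mp ((PySem.Set.mem_ofList _ _).mp hm) with h | h
    · rcases List.mem_map.mp h with ⟨p, hp, hpe⟩
      rw [← hpe]
      exact (List.mem_filter.mp hp).2
    · rcases List.mem_map.mp h with ⟨p, hp, hpe⟩
      rw [← hpe]
      exact (List.mem_filter.mp hp).2
  have hprev : ((rel.foldl pvStepA (PySem.Dict.empty, PySem.Dict.empty)).1).getD m PySem.Set.empty =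
      PySem.Set.ofList ((rel.filter (fun p => p.2 == m)).map (·.1)) := by
    rw [pvLoop_pre_getD, PySem.Dict.getD_empty, PySem.Set.update_empty]
    refine congrArg _ (congrArg _ (List.filter_congr fun p _ => ?_))
    by_cases h : p.2 = m
    · rw [h, hm', Bool.true_and]
    · have hne : (p.2 == m) = false := by simp [h]
      rw [hne, Bool.and_false]
  have hnext : ((rel.foldl pvStepA (PySem.Dict.empty, PySem.Dict.empty)).2).getD m PySem.Set.empty =
      PySem.Set.ofList ((rel.filter (fun p => p.1 == m)).map (·.2)) := by
    rw [pvLoop_post_getD, PySem.Dict.getD_empty, PySem.Set.update_empty]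
    refine congrArg _ (congrArg _ (List.filter_congr fun p _ => ?_))
    by_cases h : p.1 = m
    · rw [h, hm', Bool.true_and]
    · have hne : (p.1 == m) = false := by simp [h]
      rw [hne, Bool.and_false]
  simp only [hprev, hnext]
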